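-- pv_equiv track=rewrite | github.com/Resout/irreducible-twistor-geometry | multisite_fibre_vs_base.py | compute_K
-- ===== SOURCE A (Python) =====
-- def compute_K(m, e):
--     """Conflict between m and e."""
--     s = m[1:]
--     se = e[1:]
--     K = 0
--     for i in range(3):
--         for j in range(3):
--             if i != j:
--                 K += s[i] * se[j]
--     return K
-- ===== SOURCE B (Python) =====
-- def compute_K(m, e):
--     """Conflict between m and e."""
--     s = m[1:4]
--     se = e[1:4]
--     return sum(s) * sum(se) - (s[0]*se[0] + s[1]*se[1] + s[2]*se[2])
-- ===== Notes on version B (the rewrite author's own statement) =====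
-- stated objective: simpler
-- what changed: Replaces the 3x3 nested i!=j loop with a closed form: sum(s)*sum(se) minus the diagonal dot product of the two length-3 subvectors.
import Mathlib
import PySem

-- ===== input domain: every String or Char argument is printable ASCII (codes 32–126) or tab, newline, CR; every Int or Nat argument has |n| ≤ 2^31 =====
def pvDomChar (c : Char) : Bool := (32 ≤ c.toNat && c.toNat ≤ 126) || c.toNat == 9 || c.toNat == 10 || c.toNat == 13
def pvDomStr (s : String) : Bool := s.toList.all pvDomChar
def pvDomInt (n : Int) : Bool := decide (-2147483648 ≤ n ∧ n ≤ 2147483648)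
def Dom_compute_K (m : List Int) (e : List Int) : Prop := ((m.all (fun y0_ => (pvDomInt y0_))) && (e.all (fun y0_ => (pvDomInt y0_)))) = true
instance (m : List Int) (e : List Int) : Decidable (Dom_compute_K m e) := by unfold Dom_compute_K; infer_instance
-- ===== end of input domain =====

-- ===== PORT A =====
-- B replaces A's 3x3 guarded accumulation by the closed form sum*sum - diagonal dot (simpler).
def compute_K (m : List Int) (e : List Int) : Int :=
  let s := PySem.List.slice m (some 1) none
  let se := PySem.List.slice e (some 1) none
  (PySem.List.pyRange 0 3 1).foldl (fun K i =>
    (PySem.List.pyRange 0 3 1).foldl (fun K j =>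
      if i ≠ j then K + PySem.List.pyGetD s i 0 * PySem.List.pyGetD se j 0 else K) K) 0

-- ===== PORT B =====
def compute_K_alt (m : List Int) (e : List Int) : Int :=
  let s := PySem.List.slice m (some 1) (some 4)
  let se := PySem.List.slice e (some 1) (some 4)
  s.sum * se.sum -
    (PySem.List.pyGetD s 0 0 * PySem.List.pyGetD se 0 0 +
     PySem.List.pyGetD s 1 0 * PySem.List.pyGetD se 1 0 +
     PySem.List.pyGetD s 2 0 * PySem.List.pyGetD se 2 0)

-- ===== PRECONDITION & SPEC =====
-- Pre_ excludes exactly the inputs where A (and B) raise IndexError: lists shorter than 4.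
def Pre_compute_K (m : List Int) (e : List Int) : Prop := 4 ≤ m.length ∧ 4 ≤ e.length
instance (m : List Int) (e : List Int) : Decidable (Pre_compute_K m e) := by unfold Pre_compute_K; infer_instance
def pvWitness_compute_K : List Int × List Int := ([0, 1, 2, 3], [5, -1, 2, 7])
def Spec_compute_K (m : List Int) (e : List Int) (out : Int) : Prop := out = compute_K_alt m e
instance (m : List Int) (e : List Int) (out : Int) : Decidable (Spec_compute_K m e out) := by unfold Spec_compute_K; infer_instance

-- ===== CLAIM (what is proved, stated in full; the proofs are below) =====
def Claim_equal_compute_K : Prop := ∀ (m : List Int) (e : List Int), Dom_compute_K m e → Pre_compute_K m e → Spec_compute_K m e (compute_K m e)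

-- ===== LEMMAS AND PROOFS =====

-- ===== VERDICT =====
theorem pvRange3 : PySem.List.pyRange 0 3 1 = [0, 1, 2] := by decide

theorem compute_K_spec : Claim_equal_compute_K := by
  intro m e _ hpre
  obtain ⟨hm, he⟩ := hpre
  obtain ⟨a, b, c, d, mr, rfl⟩ : ∃ a b c d r, m = a :: b :: c :: d :: r := by
    rcases m with _ | ⟨a, _ | ⟨b, _ | ⟨c, _ | ⟨d, r⟩⟩⟩⟩
    · simp at hm
    · simp at hm
    · simp at hm
    · simp at hm
    · exact ⟨a, b, c, d, r, rfl⟩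
  obtain ⟨p, q, r, t, er, rfl⟩ : ∃ p q r t w, e = p :: q :: r :: t :: w := by
    rcases e with _ | ⟨p, _ | ⟨q, _ | ⟨r, _ | ⟨t, w⟩⟩⟩⟩
    · simp at he
    · simp at he
    · simp at he
    · simp at he
    · exact ⟨p, q, r, t, w, rfl⟩
  show compute_K _ _ = compute_K_alt _ _
  rw [compute_K, compute_K_alt,
      show PySem.List.slice (a :: b :: c :: d :: mr) (some 1) none = b :: c :: d :: mr from by
        exact_mod_cast PySem.List.slice_from_natCast (a :: b :: c :: d :: mr) 1,
      show PySem.List.slice (p :: q :: r :: t :: er) (some 1) none = q :: r :: t :: er from by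
        exact_mod_cast PySem.List.slice_from_natCast (p :: q :: r :: t :: er) 1,
      show PySem.List.slice (a :: b :: c :: d :: mr) (some 1) (some 4) = [b, c, d] from by
        exact_mod_cast PySem.List.slice_natCast (a :: b :: c :: d :: mr) 1 4,
      show PySem.List.slice (p :: q :: r :: t :: er) (some 1) (some 4) = [q, r, t] from by
        exact_mod_cast PySem.List.slice_natCast (p :: q :: r :: t :: er) 1 4]
  simp only [pvRange3, List.foldl, PySem.List.pyGetD_ofNat', List.getD, List.sum_cons,
             List.sum_nil, List.getElem?_cons_zero, List.getElem?_cons_succ, Option.getD_some]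
  norm_num
  ring
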